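-- pv_equiv track=rewrite | github.com/bbbradsmith/NESertGolfing | spc/snes.spc.tab.py | asm_wav
-- ===== SOURCE A (Python) =====
-- def asm_dump(b, form, lead, columns):
--     s = lead
--     for i in range(len(b)):
--         c = i % columns
--         if (c == 0 and i != 0):
--             s += "\n" + lead
--         if (c > 0):
--             s += ","
--         s += (form % b[i])
--     return s
--
-- def asm_byte(b, columns=32):
--     return asm_dump(b, "$%02X", ".db ", columns)
--
-- def asm_wav(w, offset=-8, columns=(9*4)):
--     assert ((len(w) % 16) == 0) # sample must be multiple of 16
--     d = bytearray()
--     for i in range(0,len(w),2):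
--         if (i % 16) == 0:
--             b = 0xA2 # shift 11, looping sample
--             if (i >= (len(w)-16)): b |= 0x01 # loop point
--             d.append(b)
--         s0 = w[i+0] + offset
--         s1 = w[i+1] + offset
--         assert (s0 >= -8 and s0 <= 7)
--         assert (s1 >= -8 and s1 <= 7)
--         d.append(((s0 & 0xF) << 4) | (s1 & 0xF))
--     return asm_byte(d,columns)
-- ===== SOURCE B (Python) =====
-- def asm_wav(w, offset=-8, columns=(9*4)):
--     assert ((len(w) % 16) == 0) # sample must be multiple of 16
--     d = []
--     n = len(w)
--     for blk in range(0, n, 16):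
--         # header byte: shift 11, looping sample; loop-point bit on the last block
--         d.append(0xA3 if blk >= n - 16 else 0xA2)
--         for j in range(blk, blk + 16, 2):
--             s0 = w[j] + offset
--             s1 = w[j + 1] + offset
--             assert (s0 >= -8 and s0 <= 7)
--             assert (s1 >= -8 and s1 <= 7)
--             d.append(((s0 & 0xF) << 4) | (s1 & 0xF))
--     if not d:
--         return ".db "
--     return "\n".join(
--         ".db " + ",".join("$%02X" % b for b in d[k:k + columns])
--         for k in range(0, len(d), columns))
-- ===== Notes on version B (the rewrite author's own statement) =====
-- stated objective: alternative
-- what changed: The flat stride-2 loop with an i%16==0 header test is replaced by an explicit two-level block structure (outer loop over 16-sample BRR blocks emitting the header, inner loop packing nibble pairs), and the character-by-character asm_dump accumulator is replaced by chunking the byte list into rows of `columns` and joining with ','/'\n'.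
import Mathlib
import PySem

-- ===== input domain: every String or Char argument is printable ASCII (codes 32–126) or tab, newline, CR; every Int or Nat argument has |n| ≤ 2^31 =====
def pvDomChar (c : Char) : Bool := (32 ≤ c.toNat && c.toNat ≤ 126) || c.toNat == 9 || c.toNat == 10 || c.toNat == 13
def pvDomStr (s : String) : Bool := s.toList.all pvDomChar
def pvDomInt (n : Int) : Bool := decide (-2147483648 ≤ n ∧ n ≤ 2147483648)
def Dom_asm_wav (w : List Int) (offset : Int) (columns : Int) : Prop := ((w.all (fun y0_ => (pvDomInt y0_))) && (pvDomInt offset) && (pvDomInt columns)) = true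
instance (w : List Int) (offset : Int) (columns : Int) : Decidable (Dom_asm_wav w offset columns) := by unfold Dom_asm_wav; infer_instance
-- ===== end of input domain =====

-- B replaces A's flat stride-2 loop + i%16 header test by an explicit block loop, and A's
-- character-accumulator formatting by chunk-the-bytes-into-rows and join; return values agree on Pre_.

-- ===== PORT A =====

-- port of the format operation '"$%02X" % x' (asm_dump is only ever called with form = "$%02X");
-- exact for 0 ≤ x < 256, which holds for every byte built by these programs
def hexDigitChar (n : Nat) : Char := if n < 10 then Char.ofNat (48 + n) else Char.ofNat (55 + n)
def pyFmtByte (x : Int) : String := String.ofList ['$', hexDigitChar (x.toNat / 16 % 16), hexDigitChar (x.toNat % 16)]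

def asm_dump (b : List Int) (lead : String) (columns : Int) : String :=
  (List.range b.length).foldl (init := lead) (fun (s : String) (i : Nat) =>
    let c := PySem.Int.mod (i : Int) columns
    let s := if c = 0 ∧ i ≠ 0 then s ++ "\n" ++ lead else s
    let s := if 0 < c then s ++ "," else s
    s ++ pyFmtByte (b.getD i 0))

def asm_byte (b : List Int) (columns : Int) : String := asm_dump b ".db " columns

def asm_wav (w : List Int) (offset : Int) (columns : Int) : String :=
  let d := (PySem.List.pyRange 0 (w.length : Int) 2).foldl (init := ([] : List Int)) (fun d i =>
    let d := if PySem.Int.mod i 16 = 0 then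
        let b : Int := 0xA2
        let b := if i ≥ (w.length : Int) - 16 then PySem.Int.bor b 0x01 else b
        d ++ [b]
      else d
    let s0 := PySem.List.pyGetD w i 0 + offset
    let s1 := PySem.List.pyGetD w (i + 1) 0 + offset
    d ++ [PySem.Int.bor ((PySem.Int.band s0 0xF) <<< (4 : Nat)) (PySem.Int.band s1 0xF)])
  asm_byte d columns

-- ===== PORT B =====

-- port of Python's str.join (sep.join(parts))
def pyJoin (sep : String) : List String → String
  | [] => ""
  | s :: rest => rest.foldl (fun acc x => acc ++ sep ++ x) s

def asm_wav_alt (w : List Int) (offset : Int) (columns : Int) : String :=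
  let d := (PySem.List.pyRange 0 (w.length : Int) 16).foldl (init := ([] : List Int)) (fun d blk =>
    let d := d ++ [if blk ≥ (w.length : Int) - 16 then (0xA3 : Int) else 0xA2]
    (PySem.List.pyRange blk (blk + 16) 2).foldl (init := d) (fun d j =>
      let s0 := PySem.List.pyGetD w j 0 + offset
      let s1 := PySem.List.pyGetD w (j + 1) 0 + offset
      d ++ [PySem.Int.bor ((PySem.Int.band s0 0xF) <<< (4 : Nat)) (PySem.Int.band s1 0xF)]))
  if d = [] then ".db " else
    pyJoin "\n" ((PySem.List.pyRange 0 (d.length : Int) columns).map (fun k =>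
      ".db " ++ pyJoin "," ((PySem.List.slice d (some k) (some (k + columns))).map pyFmtByte)))

-- ===== PRECONDITION & SPEC =====

-- Pre_ keeps A's own requirements (length a multiple of 16, samples+offset in the 4-bit range, on
-- which A's asserts fire otherwise) and excludes nonpositive column counts on nonempty samples:
-- columns = 0 makes A raise ZeroDivisionError, and for negative columns A's comma-less output (an
-- artefact of Python's negative modulo) and B's empty string are both accidental values no caller
-- would specify.
def Pre_asm_wav (w : List Int) (offset : Int) (columns : Int) : Prop :=
  w.length % 16 = 0 ∧ (∀ x ∈ w, -8 ≤ x + offset ∧ x + offset ≤ 7) ∧ (w = [] ∨ 1 ≤ columns)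
instance (w : List Int) (offset : Int) (columns : Int) : Decidable (Pre_asm_wav w offset columns) := by
  unfold Pre_asm_wav; infer_instance

def pvWitness_asm_wav : List Int × Int × Int :=
  ([0, 0, 0, 0, 0, 0, 0, 0, 0, 0, 0, 0, 0, 0, 0, 0], -8, 36)

def Spec_asm_wav (w : List Int) (offset : Int) (columns : Int) (out : String) : Prop := out = asm_wav_alt w offset columns
instance (w : List Int) (offset : Int) (columns : Int) (out : String) : Decidable (Spec_asm_wav w offset columns out) := by unfold Spec_asm_wav; infer_instance

-- ===== CLAIM (what is proved, stated in full; the proofs are below) =====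
def Claim_equal_asm_wav : Prop := ∀ (w : List Int) (offset : Int) (columns : Int), Dom_asm_wav w offset columns → Pre_asm_wav w offset columns → Spec_asm_wav w offset columns (asm_wav w offset columns)

-- ===== LEMMAS AND PROOFS =====

-- ---- shared abbreviations for the proofs ----

def pvPair (w : List Int) (offset : Int) (i : Int) : Int :=
  PySem.Int.bor ((PySem.Int.band (PySem.List.pyGetD w i 0 + offset) 0xF) <<< (4 : Nat))
    (PySem.Int.band (PySem.List.pyGetD w (i + 1) 0 + offset) 0xF)

def pvHdr (n i : Int) : Int := if i ≥ n - 16 then 0xA3 else 0xA2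

def pvGA (w : List Int) (offset n i : Int) : List Int :=
  (if PySem.Int.mod i 16 = 0 then [pvHdr n i] else []) ++ [pvPair w offset i]

def pvGB (w : List Int) (offset n blk : Int) : List Int :=
  pvHdr n blk :: (PySem.List.pyRange blk (blk + 16) 2).map (pvPair w offset)

def pvSep (c : Int) (i : Nat) : String :=
  (if PySem.Int.mod (i : Int) c = 0 ∧ i ≠ 0 then "\n" ++ ".db " else "") ++
  (if 0 < PySem.Int.mod (i : Int) c then "," else "")

def pvCat : List String → String
  | [] => ""
  | s :: r => s ++ pvCat r

def chunksOfAux (c : Nat) : Nat → List Int → List (List Int)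
  | 0, _ => []
  | _ + 1, [] => []
  | fuel + 1, x :: d => ((x :: d).take c) :: chunksOfAux c fuel ((x :: d).drop c)

def chunksOf (c : Nat) (d : List Int) : List (List Int) := chunksOfAux c d.length d

def pvRow (row : List Int) : String := ".db " ++ pyJoin "," (row.map pyFmtByte)

-- ---- small string lemmas ----

lemma pvCat_append (l1 l2 : List String) : pvCat (l1 ++ l2) = pvCat l1 ++ pvCat l2 := by
  induction l1 with
  | nil => simp [pvCat]
  | cons s l ih => simp [pvCat, ih, String.append_assoc]

lemma foldl_cat (sep : String) : ∀ (l : List String) (init : String),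
    l.foldl (fun acc x => acc ++ sep ++ x) init = init ++ pvCat (l.map (fun x => sep ++ x)) := by
  intro l
  induction l with
  | nil => intro init; simp [pvCat]
  | cons s l ih => intro init; rw [List.foldl_cons, ih]; simp [pvCat, String.append_assoc]

lemma pyJoin_cons (sep s : String) (l : List String) :
    pyJoin sep (s :: l) = s ++ pvCat (l.map (fun x => sep ++ x)) := by
  simp [pyJoin, foldl_cat]

lemma pyJoin_cons₂ (sep s : String) (l : List String) (h : l ≠ []) :
    pyJoin sep (s :: l) = s ++ sep ++ pyJoin sep l := by
  cases l with
  | nil => exact absurd rfl h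
  | cons y l' => simp [pyJoin_cons, pvCat, String.append_assoc]

lemma foldl_strcat (e : Nat → String) : ∀ (l : List Nat) (init : String),
    l.foldl (fun s i => s ++ e i) init = init ++ pvCat (l.map e) := by
  intro l
  induction l with
  | nil => intro init; simp [pvCat]
  | cons i l ih => intro init; simp [List.foldl_cons, ih, pvCat, String.append_assoc]

-- ---- chunksOf lemmas ----

lemma chunksOfAux_congr (c : Nat) (hc : 0 < c) : ∀ (f1 : Nat), ∀ (f2 : Nat) (d : List Int),
    d.length ≤ f1 → d.length ≤ f2 → chunksOfAux c f1 d = chunksOfAux c f2 d := by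
  intro f1
  induction f1 with
  | zero =>
    intro f2 d h1 h2
    have : d = [] := by cases d <;> simp_all
    subst this; cases f2 <;> simp [chunksOfAux]
  | succ f1 ih =>
    intro f2 d h1 h2
    cases d with
    | nil => cases f2 <;> simp [chunksOfAux]
    | cons x d' =>
      cases f2 with
      | zero => simp at h2
      | succ f2 =>
        simp only [chunksOfAux]
        congr 1
        apply ih
        · simp only [List.length_drop, List.length_cons] at *; omega
        · simp only [List.length_drop, List.length_cons] at *; omega

lemma chunksOf_cons (c : Nat) (hc : 0 < c) (d : List Int) (hne : d ≠ []) :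
    chunksOf c d = d.take c :: chunksOf c (d.drop c) := by
  cases d with
  | nil => exact absurd rfl hne
  | cons x d' =>
    show chunksOfAux c (d'.length + 1) (x :: d') = _
    simp only [chunksOfAux]
    congr 1
    apply chunksOfAux_congr c hc
    · simp
      omega
    · simp

lemma chunksOf_ne_nil (c : Nat) (hc : 0 < c) (d : List Int) (hne : d ≠ []) :
    chunksOf c d ≠ [] := by
  rw [chunksOf_cons c hc d hne]; simp

-- ---- modular arithmetic helpers ----

lemma pv_mod_zero (c : Int) (hc : 1 ≤ c) (start : Nat) (hdvd : c.toNat ∣ start) :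
    PySem.Int.mod (start : Int) c = 0 := by
  rw [PySem.Int.mod_eq_zero_iff_dvd]
  obtain ⟨q, rfl⟩ := hdvd
  exact ⟨(q : Int), by push_cast; rw [Int.toNat_of_nonneg (by omega)]⟩

lemma pv_mod_r (c : Int) (hc : 1 ≤ c) (start r : Nat) (hdvd : c.toNat ∣ start) (hr : (r : Int) < c) :
    PySem.Int.mod ((start + r : Nat) : Int) c = r := by
  obtain ⟨q, hq⟩ := hdvd
  rw [PySem.Int.mod_eq_emod_of_pos (by omega)]
  have hcast : ((start + r : Nat) : Int) = (r : Int) + c * (q : Int) := by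
    subst hq; push_cast; rw [Int.toNat_of_nonneg (by omega)]; ring
  rw [hcast, Int.add_mul_emod_self_left, Int.emod_eq_of_lt (by positivity) hr]

-- ---- the formatting equivalence ----

lemma pv_block (c : Int) (hc : 1 ≤ c) : ∀ (bl : List Int) (r start : Nat), 0 < r →
    r + bl.length ≤ c.toNat → c.toNat ∣ start →
    pvCat ((bl.zipIdx (start + r)).map (fun p => pvSep c p.2 ++ pyFmtByte p.1)) =
      pvCat (bl.map (fun y => "," ++ pyFmtByte y)) := by
  intro bl
  induction bl with
  | nil => intro r start _ _ _; simp
  | cons y bl ih =>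
    intro r start hr hle hdvd
    have hmod : PySem.Int.mod ((start + r : Nat) : Int) c = r :=
      pv_mod_r c hc start r hdvd (by simp at hle ⊢; omega)
    have h1 : ¬(PySem.Int.mod ((start + r : Nat) : Int) c = 0 ∧ (start + r) ≠ 0) := by
      rw [hmod]; rintro ⟨h, -⟩; omega
    have h2 : 0 < PySem.Int.mod ((start + r : Nat) : Int) c := by rw [hmod]; exact_mod_cast hr
    have hstep := ih (r + 1) start (by omega) (by simp at hle ⊢; omega) hdvd
    simp only [List.zipIdx_cons, List.map_cons, pvCat]
    rw [pvSep, if_neg h1, if_pos h2]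
    have : start + r + 1 = start + (r + 1) := by omega
    rw [this, hstep]
    simp [String.append_assoc]

lemma pv_key (c : Int) (hc : 1 ≤ c) : ∀ (fuel : Nat) (e : List Int) (start : Nat),
    e.length ≤ fuel → e ≠ [] → c.toNat ∣ start →
    (if start = 0 then (".db " : String) else "") ++
        pvCat ((e.zipIdx start).map (fun p => pvSep c p.2 ++ pyFmtByte p.1)) =
      (if start = 0 then ("" : String) else "\n") ++
        pyJoin "\n" ((chunksOf c.toNat e).map pvRow) := by
  intro fuel
  induction fuel with
  | zero =>
    intro e start hlen hne _
    cases e with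
    | nil => exact absurd rfl hne
    | cons x e' => simp at hlen
  | succ fuel ih =>
    intro e start hlen hne hdvd
    obtain ⟨x, e', rfl⟩ : ∃ x e', e = x :: e' := by
      cases e with
      | nil => exact absurd rfl hne
      | cons x e' => exact ⟨x, e', rfl⟩
    have hc0 : 0 < c.toNat := by omega
    have hsep0 : pvSep c start = if start = 0 then "" else "\n" ++ ".db " := by
      rw [pvSep, pv_mod_zero c hc start hdvd]
      by_cases hs : start = 0 <;> simp [hs]
    have hkey := List.take_append_drop (c.toNat - 1) e'
    set bl := e'.take (c.toNat - 1) with hbl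
    set rest := e'.drop (c.toNat - 1) with hrest
    have hchunk : chunksOf c.toNat (x :: e') = (x :: bl) :: chunksOf c.toNat rest := by
      rw [chunksOf_cons c.toNat hc0 _ (by simp)]
      congr 2
      · rw [show c.toNat = (c.toNat - 1) + 1 by omega, List.take_succ_cons]
      · rw [show c.toNat = (c.toNat - 1) + 1 by omega, List.drop_succ_cons]
    have hz1 : (x :: e').zipIdx start =
        (x, start) :: (bl.zipIdx (start + 1) ++ rest.zipIdx (start + 1 + bl.length)) := by
      rw [List.zipIdx_cons]
      congr 1
      conv_lhs => rw [← hkey]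
      rw [List.zipIdx_append]
    have hblock := pv_block c hc bl 1 start (by omega)
      (by
        have : bl.length ≤ c.toNat - 1 := by rw [hbl]; simpa using List.length_take_le _ _
        omega) hdvd
    have hrow : pvRow (x :: bl) =
        ".db " ++ (pyFmtByte x ++ pvCat (bl.map (fun y => "," ++ pyFmtByte y))) := by
      rw [pvRow, List.map_cons, pyJoin_cons, List.map_map]
      rfl
    rw [hz1, List.map_cons, List.map_append, pvCat, pvCat_append, hchunk, List.map_cons, hblock]
    by_cases hR : rest = []
    · rw [hR]
      simp only [List.zipIdx_nil, List.map_nil, pvCat, chunksOf, List.length_nil, chunksOfAux,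
        List.map_nil]
      have hj : pyJoin "\n" [pvRow (x :: bl)] = pvRow (x :: bl) := by simp [pyJoin]
      rw [hj, hrow, hsep0]
      by_cases hs : start = 0 <;> simp [hs, ← String.append_assoc]
    · have hbllen : bl.length = c.toNat - 1 := by
        have hge : c.toNat - 1 ≤ e'.length := by
          by_contra hlt
          exact hR (by rw [hrest]; exact List.drop_eq_nil_of_le (by omega))
        rw [hbl, List.length_take]
        omega
      have hihr := ih rest (start + c.toNat)
        (by
          have h1 : rest.length ≤ e'.length := by rw [hrest]; simp
          have h2 : e'.length ≤ fuel := by simp only [List.length_cons] at hlen; omega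
          omega)
        hR (dvd_add hdvd (dvd_refl c.toNat))
      rw [if_neg (by omega), if_neg (by omega)] at hihr
      have hstart : start + 1 + bl.length = start + c.toNat := by omega
      rw [hstart]
      have hcne := chunksOf_ne_nil c.toNat hc0 rest hR
      have hj : pyJoin "\n" (pvRow (x :: bl) :: (chunksOf c.toNat rest).map pvRow) =
          pvRow (x :: bl) ++ "\n" ++ pyJoin "\n" ((chunksOf c.toNat rest).map pvRow) :=
        pyJoin_cons₂ _ _ _ (by simpa using hcne)
      rw [hj, hrow, hsep0]
      have hihr' : pvCat ((rest.zipIdx (start + c.toNat)).map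
          (fun p => pvSep c p.2 ++ pyFmtByte p.1)) =
          "\n" ++ pyJoin "\n" ((chunksOf c.toNat rest).map pvRow) := by
        calc pvCat ((rest.zipIdx (start + c.toNat)).map (fun p => pvSep c p.2 ++ pyFmtByte p.1))
            = "" ++ pvCat ((rest.zipIdx (start + c.toNat)).map
                (fun p => pvSep c p.2 ++ pyFmtByte p.1)) := by simp
          _ = _ := hihr
      rw [hihr']
      by_cases hs : start = 0 <;> simp [hs, ← String.append_assoc]

lemma zip_range (g : Nat → Int → String) : ∀ (d : List Int) (s : Nat),
    (List.range d.length).map (fun i => g (s + i) (d.getD i 0)) =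
      (d.zipIdx s).map (fun p => g p.2 p.1) := by
  intro d
  induction d with
  | nil => intro s; simp
  | cons x d' ih =>
    intro s
    have hlen : (x :: d').length = 1 + d'.length := by simp [Nat.add_comm]
    rw [hlen, List.range_add, List.zipIdx_cons]
    simp only [List.map_append, List.map_map, List.map_cons]
    have hhead : (List.range 1).map (fun i => g (s + i) ((x :: d').getD i 0)) = [g s x] := by
      simp
    rw [hhead, ← ih (s + 1)]
    have htail : List.map ((fun i => g (s + i) ((x :: d').getD i 0)) ∘ fun x => 1 + x)
        (List.range d'.length) =
        List.map (fun i => g (s + 1 + i) (d'.getD i 0)) (List.range d'.length) := by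
      refine List.map_congr_left ?_
      intro a _
      show g (s + (1 + a)) ((x :: d').getD (1 + a) 0) = g (s + 1 + a) (d'.getD a 0)
      have h1 : s + (1 + a) = s + 1 + a := by omega
      have h2 : (x :: d').getD (1 + a) 0 = d'.getD a 0 := by
        rw [Nat.add_comm 1 a]; simp [List.getD]
      rw [h1, h2]
    rw [htail]
    rfl

lemma dump_norm (c : Int) (d : List Int) :
    asm_dump d ".db " c =
      ".db " ++ pvCat ((List.range d.length).map (fun i => pvSep c i ++ pyFmtByte (d.getD i 0))) := by
  unfold asm_dump
  refine (PySem.List.foldl_congr_mem _ _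
      (fun s i => s ++ (pvSep c i ++ pyFmtByte (d.getD i 0))) _ ?_).trans (foldl_strcat _ _ _)
  intro acc x _
  dsimp only
  rw [pvSep]
  split_ifs <;> simp [String.append_assoc]

lemma pv_chunks_nat (cN : Nat) (hc : 0 < cN) : ∀ (fuel : Nat) (d : List Int), d.length ≤ fuel →
    (List.range ((d.length + cN - 1) / cN)).map (fun k => (d.drop (cN * k)).take cN) =
      chunksOf cN d := by
  intro fuel
  induction fuel with
  | zero =>
    intro d hlen
    have : d = [] := by cases d <;> simp_all
    subst this
    simp only [List.length_nil]
    rw [show (0 + cN - 1) / cN = 0 from Nat.div_eq_of_lt (by omega)]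
    rfl
  | succ fuel ih =>
    intro d hlen
    cases d with
    | nil =>
      simp only [List.length_nil]
      rw [show (0 + cN - 1) / cN = 0 from Nat.div_eq_of_lt (by omega)]
      rfl
    | cons x d' =>
      have hN1 : ((x :: d').length + cN - 1) / cN = ((x :: d').length - 1) / cN + 1 := by
        rw [show (x :: d').length + cN - 1 = ((x :: d').length - 1) + cN by simp only [List.length_cons]; omega,
            Nat.add_div_right _ hc]
      have hN2 : ((x :: d').length - 1) / cN = (((x :: d').drop cN).length + cN - 1) / cN := by
        simp only [List.length_drop, List.length_cons]
        by_cases hle : d'.length + 1 ≤ cN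
        · rw [Nat.div_eq_of_lt (by omega), show d'.length + 1 - cN = 0 by omega,
              Nat.div_eq_of_lt (by omega)]
        · replace hle : cN < d'.length + 1 := by omega
          rw [show d'.length + 1 - cN + cN - 1 = (d'.length + 1 - cN - 1) + cN by omega,
              Nat.add_div_right _ hc,
              show d'.length + 1 - 1 = (d'.length + 1 - cN - 1) + cN by omega,
              Nat.add_div_right _ hc]
      rw [hN1, hN2, Nat.add_comm _ 1, List.range_add, List.map_append, List.map_map]
      have hhead : (List.range 1).map (fun k => (((x :: d').drop (cN * k)).take cN)) =
          [(x :: d').take cN] := by simp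
      rw [hhead]
      have htail : List.map ((fun k => (((x :: d').drop (cN * k)).take cN)) ∘ fun y => 1 + y)
          (List.range ((((x :: d').drop cN).length + cN - 1) / cN)) =
          List.map (fun k => ((((x :: d').drop cN).drop (cN * k)).take cN))
          (List.range ((((x :: d').drop cN).length + cN - 1) / cN)) := by
        refine List.map_congr_left ?_
        intro k _
        show (((x :: d').drop (cN * (1 + k))).take cN) = _
        rw [List.drop_drop]
        congr 2
        ring
      rw [htail, ih ((x :: d').drop cN)
            (by simp only [List.length_drop, List.length_cons] at *; omega),
          List.singleton_append, chunksOf_cons cN hc (x :: d') (by simp)]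

lemma pv_chunks (c : Int) (hc : 1 ≤ c) (d : List Int) :
    (PySem.List.pyRange 0 (d.length : Int) c).map
        (fun k => PySem.List.slice d (some k) (some (k + c))) = chunksOf c.toNat d := by
  have hcc : c = (c.toNat : Int) := by omega
  rw [PySem.List.pyRange_of_pos _ _ (by omega)]
  have hcount : (if (0:Int) < (d.length : Int) then (((d.length : Int) - 0 + c - 1) / c).toNat else 0) =
      (d.length + c.toNat - 1) / c.toNat := by
    split
    · rw [hcc]
      rw [show (d.length : Int) - 0 + (c.toNat : Int) - 1 = ((d.length + c.toNat - 1 : Nat) : Int) by omega,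
          ← Int.natCast_div]
      exact Int.toNat_natCast _
    · rw [show d.length = 0 by omega, Nat.div_eq_of_lt (by omega)]
  rw [hcount, List.map_map]
  rw [← pv_chunks_nat c.toNat (by omega) d.length d le_rfl]
  refine List.map_congr_left ?_
  intro k _
  show PySem.List.slice d (some (0 + c * (k : Int))) (some (0 + c * (k : Int) + c)) = _
  rw [hcc]
  rw [show (0 : Int) + (c.toNat : Int) * (k : Int) = ((c.toNat * k : Nat) : Int) by push_cast; ring,
      show ((c.toNat * k : Nat) : Int) + (c.toNat : Int) = ((c.toNat * k + c.toNat : Nat) : Int) by push_cast; ring,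
      PySem.List.slice_natCast]
  congr 1
  omega

lemma pv_fmt (c : Int) (hc : 1 ≤ c) (d : List Int) (hne : d ≠ []) :
    asm_dump d ".db " c =
      pyJoin "\n" ((PySem.List.pyRange 0 (d.length : Int) c).map (fun k =>
        ".db " ++ pyJoin "," ((PySem.List.slice d (some k) (some (k + c))).map pyFmtByte))) := by
  have h1 := dump_norm c d
  have h2 := zip_range (fun i v => pvSep c i ++ pyFmtByte v) d 0
  simp only [Nat.zero_add] at h2
  have h3 := pv_key c hc d.length d 0 le_rfl hne ⟨0, rfl⟩
  have h4 : (PySem.List.pyRange 0 (d.length : Int) c).map (fun k =>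
      ".db " ++ pyJoin "," ((PySem.List.slice d (some k) (some (k + c))).map pyFmtByte)) =
      (chunksOf c.toNat d).map pvRow := by
    rw [← pv_chunks c hc d, List.map_map]
    rfl
  rw [h1, h2, h4]
  calc ".db " ++ pvCat ((d.zipIdx 0).map fun p => pvSep c p.2 ++ pyFmtByte p.1)
      = "" ++ pyJoin "\n" ((chunksOf c.toNat d).map pvRow) := h3
    _ = _ := by simp

-- ---- the byte-building equivalence ----

lemma pyRange_nil_of_le (a b s : Int) (hs : 0 < s) (h : b ≤ a) : PySem.List.pyRange a b s = [] := by
  rw [PySem.List.pyRange_of_pos _ _ hs, if_neg (by omega)]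
  rfl

lemma pyRange_inner (a : Int) : PySem.List.pyRange a (a + 16) 2 =
    (List.range 8).map (fun k : Nat => a + 2 * (k : Int)) := by
  rw [PySem.List.pyRange_of_pos _ _ (by norm_num), if_pos (by omega)]
  have : ((a + 16 - a + 2 - 1) / 2).toNat = 8 := by
    have h17 : a + 16 - a + 2 - 1 = 17 := by ring
    rw [h17]; rfl
  rw [this]

lemma pyRange2_split (a n : Int) (m : Nat) (h : n = a + 16 * ((m : Int) + 1)) :
    PySem.List.pyRange a n 2 = PySem.List.pyRange a (a + 16) 2 ++ PySem.List.pyRange (a + 16) n 2 := by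
  rw [PySem.List.pyRange_of_pos a n (by norm_num), if_pos (by omega)]
  have hcount : ((n - a + 2 - 1) / 2).toNat = 8 + 8 * m := by omega
  rw [hcount, List.range_add, List.map_append, pyRange_inner]
  congr 1
  rw [PySem.List.pyRange_of_pos (a + 16) n (by norm_num)]
  have hcount2 : (if a + 16 < n then ((n - (a + 16) + 2 - 1) / 2).toNat else 0) = 8 * m := by
    split <;> omega
  rw [hcount2, List.map_map]
  refine List.map_congr_left ?_
  intro k _
  show a + 2 * ((8 + k : Nat) : Int) = (a + 16) + 2 * (k : Int)
  push_cast
  ring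

lemma pyRange16_cons (a n : Int) (m : Nat) (h : n = a + 16 * ((m : Int) + 1)) :
    PySem.List.pyRange a n 16 = a :: PySem.List.pyRange (a + 16) n 16 := by
  rw [PySem.List.pyRange_of_pos a n (by norm_num), if_pos (by omega)]
  have hcount : ((n - a + 16 - 1) / 16).toNat = 1 + m := by omega
  rw [hcount, List.range_add, List.map_append]
  have hhead : (List.range 1).map (fun k : Nat => a + 16 * (k : Int)) = [a] := by simp
  rw [hhead, List.singleton_append]
  congr 1
  rw [PySem.List.pyRange_of_pos (a + 16) n (by norm_num)]
  have hcount2 : (if a + 16 < n then ((n - (a + 16) + 16 - 1) / 16).toNat else 0) = m := by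
    split <;> omega
  rw [hcount2, List.map_map]
  refine List.map_congr_left ?_
  intro k _
  show a + 16 * ((1 + k : Nat) : Int) = (a + 16) + 16 * (k : Int)
  push_cast
  ring

lemma pv_block_bytes (w : List Int) (offset n a : Int) (ha : 16 ∣ a) :
    ((List.range 8).map (fun k : Nat => a + 2 * (k : Int))).flatMap (pvGA w offset n) =
      pvGB w offset n a := by
  obtain ⟨t, rfl⟩ := ha
  have hrange : List.range 8 = [0, 1, 2, 3, 4, 5, 6, 7] := by decide
  rw [pvGB, pyRange_inner, hrange]
  simp only [List.map_cons, List.map_nil, List.flatMap_cons, List.flatMap_nil]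
  have h0 : PySem.Int.mod (16 * t + 2 * ((0 : Nat) : Int)) 16 = 0 := by
    rw [PySem.Int.mod_eq_emod_of_pos (by norm_num)]; push_cast; omega
  rw [pvGA, if_pos h0]
  have hne : ∀ (r : Nat), (r : Int) ≠ 0 → r < 8 →
      pvGA w offset n (16 * t + 2 * (r : Int)) = [pvPair w offset (16 * t + 2 * (r : Int))] := by
    intro r hr hr8
    rw [pvGA, if_neg, List.nil_append]
    rw [PySem.Int.mod_eq_emod_of_pos (by norm_num)]
    have : (0:Int) < r := by omega
    omega
  rw [hne 1 (by norm_num) (by norm_num), hne 2 (by norm_num) (by norm_num),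
      hne 3 (by norm_num) (by norm_num), hne 4 (by norm_num) (by norm_num),
      hne 5 (by norm_num) (by norm_num), hne 6 (by norm_num) (by norm_num),
      hne 7 (by norm_num) (by norm_num)]
  simp

lemma blocks_eq (w : List Int) (offset : Int) (n : Int) : ∀ (m : Nat) (a : Int), 16 ∣ a →
    n = a + 16 * (m : Int) →
    (PySem.List.pyRange a n 2).flatMap (pvGA w offset n) =
      (PySem.List.pyRange a n 16).flatMap (pvGB w offset n) := by
  intro m
  induction m with
  | zero =>
    intro a _ hn
    rw [pyRange_nil_of_le a n 2 (by norm_num) (by omega),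
        pyRange_nil_of_le a n 16 (by norm_num) (by omega)]
    rfl
  | succ m ih =>
    intro a ha hn
    rw [pyRange2_split a n m (by push_cast at hn ⊢; omega),
        pyRange16_cons a n m (by push_cast at hn ⊢; omega)]
    rw [List.flatMap_append, List.flatMap_cons]
    congr 1
    · rw [pyRange_inner, pv_block_bytes w offset n a ha]
    · exact ih (a + 16) (by omega) (by push_cast at hn ⊢; omega)

-- ---- assembling the verdict ----

lemma foldA_norm (w : List Int) (offset : Int) (l : List Int) (d0 : List Int) :
    l.foldl (fun d i =>
      let d := if PySem.Int.mod i 16 = 0 then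
          let b : Int := 0xA2
          let b := if i ≥ (w.length : Int) - 16 then PySem.Int.bor b 0x01 else b
          d ++ [b]
        else d
      let s0 := PySem.List.pyGetD w i 0 + offset
      let s1 := PySem.List.pyGetD w (i + 1) 0 + offset
      d ++ [PySem.Int.bor ((PySem.Int.band s0 0xF) <<< (4 : Nat)) (PySem.Int.band s1 0xF)]) d0 =
    d0 ++ l.flatMap (pvGA w offset (w.length : Int)) := by
  refine (PySem.List.foldl_congr_mem _ _
      (fun d i => d ++ pvGA w offset (w.length : Int) i) _ ?_).trans
    (PySem.List.foldl_append_eq_flatMap _ _ _)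
  intro acc x _
  dsimp only
  rw [pvGA, pvPair, pvHdr]
  have hbor : PySem.Int.bor 0xA2 0x01 = 0xA3 := by decide
  split_ifs <;> simp [hbor]

lemma foldB_inner_norm (w : List Int) (offset : Int) (l : List Int) (d0 : List Int) :
    l.foldl (fun d j =>
      let s0 := PySem.List.pyGetD w j 0 + offset
      let s1 := PySem.List.pyGetD w (j + 1) 0 + offset
      d ++ [PySem.Int.bor ((PySem.Int.band s0 0xF) <<< (4 : Nat)) (PySem.Int.band s1 0xF)]) d0 =
    d0 ++ l.map (pvPair w offset) := by
  refine (PySem.List.foldl_congr_mem _ _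
      (fun d j => d ++ [pvPair w offset j]) _ ?_).trans
    (PySem.List.foldl_append_singleton_eq_map _ _ _)
  intro acc x _
  rfl

lemma foldB_norm (w : List Int) (offset : Int) (l : List Int) (d0 : List Int) :
    l.foldl (fun d blk =>
      let d := d ++ [if blk ≥ (w.length : Int) - 16 then (0xA3 : Int) else 0xA2]
      (PySem.List.pyRange blk (blk + 16) 2).foldl (init := d) (fun d j =>
        let s0 := PySem.List.pyGetD w j 0 + offset
        let s1 := PySem.List.pyGetD w (j + 1) 0 + offset
        d ++ [PySem.Int.bor ((PySem.Int.band s0 0xF) <<< (4 : Nat)) (PySem.Int.band s1 0xF)])) d0 =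
    d0 ++ l.flatMap (pvGB w offset (w.length : Int)) := by
  refine (PySem.List.foldl_congr_mem _ _
      (fun d blk => d ++ pvGB w offset (w.length : Int) blk) _ ?_).trans
    (PySem.List.foldl_append_eq_flatMap _ _ _)
  intro acc x _
  dsimp only
  rw [foldB_inner_norm, pvGB, pvHdr]
  simp

-- ===== VERDICT (by name: the statement is the Claim_ definition above) =====
theorem asm_wav_spec : Claim_equal_asm_wav := by
  intro w offset columns _ hpre
  obtain ⟨h16, _hval, hcol⟩ := hpre
  have hA : asm_wav w offset columns =
      asm_dump ((PySem.List.pyRange 0 (w.length : Int) 2).foldl (init := ([] : List Int)) (fun d i =>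
        let d := if PySem.Int.mod i 16 = 0 then
            let b : Int := 0xA2
            let b := if i ≥ (w.length : Int) - 16 then PySem.Int.bor b 0x01 else b
            d ++ [b]
          else d
        let s0 := PySem.List.pyGetD w i 0 + offset
        let s1 := PySem.List.pyGetD w (i + 1) 0 + offset
        d ++ [PySem.Int.bor ((PySem.Int.band s0 0xF) <<< (4 : Nat)) (PySem.Int.band s1 0xF)]))
        ".db " columns := rfl
  have hB : asm_wav_alt w offset columns =
      (if ((PySem.List.pyRange 0 (w.length : Int) 16).foldl (init := ([] : List Int)) (fun d blk =>
          let d := d ++ [if blk ≥ (w.length : Int) - 16 then (0xA3 : Int) else 0xA2]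
          (PySem.List.pyRange blk (blk + 16) 2).foldl (init := d) (fun d j =>
            let s0 := PySem.List.pyGetD w j 0 + offset
            let s1 := PySem.List.pyGetD w (j + 1) 0 + offset
            d ++ [PySem.Int.bor ((PySem.Int.band s0 0xF) <<< (4 : Nat)) (PySem.Int.band s1 0xF)])))
          = [] then ".db " else
        pyJoin "\n" ((PySem.List.pyRange 0
            (((PySem.List.pyRange 0 (w.length : Int) 16).foldl (init := ([] : List Int)) (fun d blk =>
              let d := d ++ [if blk ≥ (w.length : Int) - 16 then (0xA3 : Int) else 0xA2]
              (PySem.List.pyRange blk (blk + 16) 2).foldl (init := d) (fun d j =>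
                let s0 := PySem.List.pyGetD w j 0 + offset
                let s1 := PySem.List.pyGetD w (j + 1) 0 + offset
                d ++ [PySem.Int.bor ((PySem.Int.band s0 0xF) <<< (4 : Nat)) (PySem.Int.band s1 0xF)]))).length : Int)
            columns).map (fun k =>
          ".db " ++ pyJoin "," ((PySem.List.slice
            ((PySem.List.pyRange 0 (w.length : Int) 16).foldl (init := ([] : List Int)) (fun d blk =>
              let d := d ++ [if blk ≥ (w.length : Int) - 16 then (0xA3 : Int) else 0xA2]
              (PySem.List.pyRange blk (blk + 16) 2).foldl (init := d) (fun d j =>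
                let s0 := PySem.List.pyGetD w j 0 + offset
                let s1 := PySem.List.pyGetD w (j + 1) 0 + offset
                d ++ [PySem.Int.bor ((PySem.Int.band s0 0xF) <<< (4 : Nat)) (PySem.Int.band s1 0xF)])))
            (some k) (some (k + columns))).map pyFmtByte)))) := rfl
  show Spec_asm_wav w offset columns (asm_wav w offset columns)
  unfold Spec_asm_wav
  rw [hA, hB, foldA_norm, foldB_norm, List.nil_append, List.nil_append]
  obtain ⟨m, hm⟩ := Nat.dvd_of_mod_eq_zero h16
  have hbytes := blocks_eq w offset (w.length : Int) m 0 ⟨0, by ring⟩ (by push_cast [hm]; ring)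
  rw [hbytes]
  set d := (PySem.List.pyRange 0 (w.length : Int) 16).flatMap (pvGB w offset (w.length : Int)) with hd
  by_cases hw : w = []
  · subst hw
    have hdnil : d = [] := by
      rw [hd]
      simp only [List.length_nil, Nat.cast_zero]
      rw [pyRange_nil_of_le 0 0 16 (by norm_num) le_rfl]
      rfl
    rw [hdnil]
    simp [asm_dump]
  · have hcols : 1 ≤ columns := hcol.resolve_left hw
    have hdne : d ≠ [] := by
      have hm1 : 1 ≤ m := by
        rcases Nat.eq_zero_or_pos m with h | h
        · exfalso
          apply hw
          rw [h, Nat.mul_zero] at hm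
          exact List.eq_nil_of_length_eq_zero hm
        · exact h
      have hcons := pyRange16_cons 0 (w.length : Int) (m - 1)
        (by
          have : (1:Int) ≤ (m:Int) := by exact_mod_cast hm1
          push_cast [hm]
          omega)
      rw [hd, hcons]
      simp [pvGB]
    rw [if_neg hdne]
    exact pv_fmt columns hcols d hdne
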